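-- pv_equiv track=rewrite | github.com/GJzh/Leetcode | python/809. Expressive Words.py | stretchy
-- ===== SOURCE A (Python) =====
-- def stretchy(reference, word):
--     idx = 0
--     pos = 0
--     while idx < len(word):
--         cur = word[idx]
--         if pos == len(reference) or reference[pos][0] != cur: return False
--         k = 0
--         while idx <  len(word) and word[idx] == cur:
--             idx += 1
--             k += 1
--         if (reference[pos][1] < 3 and reference[pos][1] != k) or (reference[pos][1] >= 3 and k > reference[pos][1]):
--             return False
--         pos += 1
--     return pos == len(reference)
-- ===== SOURCE B (Python) =====
-- def stretchy(reference, word):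
--     groups = []
--     for ch in word:
--         if groups and groups[-1][0] == ch:
--             groups[-1][1] += 1
--         else:
--             groups.append([ch, 1])
--     if len(groups) != len(reference):
--         return False
--     for (rc, rn), (wc, wk) in zip(reference, groups):
--         if rc != wc:
--             return False
--         if rn < 3:
--             if rn != wk:
--                 return False
--         elif wk > rn:
--             return False
--     return True
-- ===== Notes on version B (the rewrite author's own statement) =====
-- stated objective: simpler
-- what changed: Replaces A's interleaved two-pointer walk with a build-then-compare decomposition: run-length-encode word once into groups, return False if the group count differs from len(reference), then compare the zipped group pairs.
import Mathlib
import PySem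

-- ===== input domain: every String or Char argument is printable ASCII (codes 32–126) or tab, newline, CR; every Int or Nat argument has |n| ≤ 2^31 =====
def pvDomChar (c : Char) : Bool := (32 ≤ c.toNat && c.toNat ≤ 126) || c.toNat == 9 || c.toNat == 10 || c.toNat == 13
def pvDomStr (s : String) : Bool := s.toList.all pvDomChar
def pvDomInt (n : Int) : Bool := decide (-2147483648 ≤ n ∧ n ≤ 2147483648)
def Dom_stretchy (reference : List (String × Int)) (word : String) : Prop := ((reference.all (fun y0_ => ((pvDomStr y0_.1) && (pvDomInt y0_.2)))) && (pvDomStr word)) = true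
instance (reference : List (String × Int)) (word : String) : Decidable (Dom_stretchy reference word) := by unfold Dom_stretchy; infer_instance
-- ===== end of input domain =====

-- B replaces A's interleaved two-pointer walk by a build-then-compare decomposition
-- (run-length-encode word once, check the group count, then compare groups pairwise); objective: simpler.

-- ===== PORT A =====
-- inner while: consume the run of `cur` at the front, returning its length k and the rest
def runA (cur : Char) : List Char → Nat × List Char
  | [] => (0, [])
  | c :: cs => if c = cur then let p := runA cur cs; (p.1 + 1, p.2) else (0, c :: cs)

theorem runA_len_le (cur : Char) : ∀ cs : List Char, (runA cur cs).2.length ≤ cs.length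
  | [] => by simp [runA]
  | c :: cs => by
      simp only [runA]
      split
      · exact le_trans (runA_len_le cur cs) (Nat.le_succ _)
      · simp

-- outer while: structural recursion on the remaining characters; the remaining
-- reference groups play the role of the pos index (pos == len(reference) ↔ empty)
def loopA (refs : List (String × Int)) (chars : List Char) : Bool :=
  match refs, chars with
  | refs, [] => refs.isEmpty                                      -- return pos == len(reference)
  | [], _ :: _ => false                                           -- pos == len(reference)
  | (s, n) :: rest, c :: cs =>
      if s ≠ String.ofList [c] then false                         -- reference[pos][0] != cur
      else
        let k := (runA c (c :: cs)).1
        if (n < 3 ∧ n ≠ (k : Int)) ∨ (3 ≤ n ∧ (k : Int) > n) then false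
        else loopA rest (runA c (c :: cs)).2
termination_by chars.length
decreasing_by
  simp only [runA, reduceIte]
  exact Nat.lt_succ_of_le (runA_len_le c cs)

def stretchy (reference : List (String × Int)) (word : String) : Bool :=
  loopA reference word.toList

-- ===== PORT B =====
-- forward run-length encoding; acc holds the groups built so far, most recent first
-- (Python's groups[-1] access/mutation = the head of acc), reversed at the end
def rleB (acc : List (Char × Nat)) : List Char → List (Char × Nat)
  | [] => acc.reverse
  | c :: cs =>
    match acc with
    | (d, k) :: rest => if d = c then rleB ((d, k + 1) :: rest) cs
                        else rleB ((c, 1) :: (d, k) :: rest) cs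
    | [] => rleB [(c, 1)] cs

-- the zip loop: compare reference groups and word groups pairwise
def checkB : List (String × Int) → List (Char × Nat) → Bool
  | (rc, rn) :: rs, (wc, wk) :: ws =>
      if rc ≠ String.ofList [wc] then false
      else if rn < 3 then (if rn ≠ (wk : Int) then false else checkB rs ws)
      else if (wk : Int) > rn then false
      else checkB rs ws
  | _, _ => true                                                  -- zip stops at the shorter list

def stretchy_alt (reference : List (String × Int)) (word : String) : Bool :=
  let groups := rleB [] word.toList
  if groups.length ≠ reference.length then false
  else checkB reference groups

-- ===== PRECONDITION & SPEC =====
def Spec_stretchy (reference : List (String × Int)) (word : String) (out : Bool) : Prop := out = stretchy_alt reference word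
instance (reference : List (String × Int)) (word : String) (out : Bool) : Decidable (Spec_stretchy reference word out) := by unfold Spec_stretchy; infer_instance

-- ===== CLAIM (what is proved, stated in full; the proofs are below) =====
def Claim_equal_stretchy : Prop := ∀ (reference : List (String × Int)) (word : String), Dom_stretchy reference word → Spec_stretchy reference word (stretchy reference word)

-- ===== LEMMAS AND PROOFS =====

theorem runA_cons_eq (c : Char) (cs : List Char) :
    runA c (c :: cs) = ((runA c cs).1 + 1, (runA c cs).2) := by
  simp [runA]

theorem runA_cons_ne (c d : Char) (cs : List Char) (h : d ≠ c) :
    runA c (d :: cs) = (0, d :: cs) := by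
  simp [runA, h]

theorem rleB_nil (acc : List (Char × Nat)) : rleB acc [] = acc.reverse := rfl

theorem rleB_cons_headeq (d : Char) (k : Nat) (rest : List (Char × Nat)) (cs : List Char) :
    rleB ((d, k) :: rest) (d :: cs) = rleB ((d, k + 1) :: rest) cs := by
  simp [rleB]

theorem rleB_cons_headne (d : Char) (k : Nat) (rest : List (Char × Nat)) (c : Char)
    (cs : List Char) (h : d ≠ c) :
    rleB ((d, k) :: rest) (c :: cs) = rleB ((c, 1) :: (d, k) :: rest) cs := by
  simp [rleB, h]

theorem rleB_nil_cons (c : Char) (cs : List Char) : rleB [] (c :: cs) = rleB [(c, 1)] cs := rfl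

theorem rleB_go : ∀ (cs : List Char) (d : Char) (k : Nat) (rest : List (Char × Nat)),
    rleB ((d, k) :: rest) cs = rest.reverse ++ rleB [(d, k)] cs := by
  intro cs
  induction cs with
  | nil => intro d k rest; simp [rleB_nil]
  | cons c cs ih =>
      intro d k rest
      by_cases h : d = c
      · subst h
        rw [rleB_cons_headeq, rleB_cons_headeq, ih]
      · rw [rleB_cons_headne d k rest c cs h, rleB_cons_headne d k [] c cs h,
            ih c 1 ((d, k) :: rest), ih c 1 [(d, k)]]
        simp

theorem rleB_single : ∀ (cs : List Char) (c : Char) (k : Nat),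
    rleB [(c, k)] cs = (c, k + (runA c cs).1) :: rleB [] (runA c cs).2 := by
  intro cs
  induction cs with
  | nil => intro c k; simp [rleB_nil, runA]
  | cons d cs ih =>
      intro c k
      by_cases h : d = c
      · subst h
        rw [rleB_cons_headeq, ih, runA_cons_eq]
        have : k + 1 + (runA d cs).1 = k + ((runA d cs).1 + 1) := by omega
        rw [this]
      · rw [rleB_cons_headne c k [] d cs (fun he => h he.symm), rleB_go cs d 1 [(c, k)],
            runA_cons_ne c d cs h, rleB_nil_cons]
        simp

theorem rleB_cons (c : Char) (cs : List Char) :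
    rleB [] (c :: cs) = (c, (runA c (c :: cs)).1) :: rleB [] (runA c (c :: cs)).2 := by
  rw [rleB_nil_cons, rleB_single, runA_cons_eq]
  have : (1 : Nat) + (runA c cs).1 = (runA c cs).1 + 1 := by omega
  rw [this]

-- B's body as a function of the char list
def altBody (refs : List (String × Int)) (chars : List Char) : Bool :=
  if (rleB [] chars).length ≠ refs.length then false else checkB refs (rleB [] chars)

theorem loopA_eq_altBody : ∀ (chars : List Char) (refs : List (String × Int)),
    loopA refs chars = altBody refs chars
  | [], refs => by
      cases refs with
      | nil => simp only [loopA]; rfl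
      | cons r rs => simp [loopA, altBody, rleB_nil]
  | c :: cs, refs => by
      have hrle := rleB_cons c cs
      match refs with
      | [] =>
          simp only [loopA, altBody, hrle]
          simp
      | (s, n') :: rest =>
          have ih := loopA_eq_altBody ((runA c (c :: cs)).2) rest
          by_cases hs : s = String.ofList [c]
          · simp only [loopA, altBody, hrle]
            rw [if_neg (show ¬ (s ≠ String.ofList [c]) from by simp [hs])]
            set k := (runA c (c :: cs)).1 with hk
            set rcs := (runA c (c :: cs)).2 with hrcs
            by_cases hcond : (n' < 3 ∧ n' ≠ (k : Int)) ∨ (3 ≤ n' ∧ (k : Int) > n')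
            · rw [if_pos hcond]
              by_cases hlen : ((c, k) :: rleB [] rcs).length ≠ ((s, n') :: rest).length
              · rw [if_pos hlen]
              · rw [if_neg hlen]
                simp only [checkB]
                rw [if_neg (show ¬ (s ≠ String.ofList [c]) from by simp [hs])]
                rcases hcond with ⟨h1, h2⟩ | ⟨h1, h2⟩
                · rw [if_pos h1, if_pos h2]
                · rw [if_neg (by omega), if_pos h2]
            · rw [if_neg hcond, ih]
              simp only [altBody]
              by_cases hlen : (rleB [] rcs).length ≠ rest.length
              · rw [if_pos hlen, if_pos (by simp at hlen ⊢; omega)]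
              · rw [if_neg hlen, if_neg (by simp at hlen ⊢; omega)]
                simp only [checkB]
                rw [if_neg (show ¬ (s ≠ String.ofList [c]) from by simp [hs])]
                push Not at hcond
                by_cases h3 : n' < 3
                · rw [if_pos h3, if_neg (show ¬ n' ≠ (k : Int) from by simp [hcond.1 h3])]
                · rw [if_neg h3, if_neg (by have := hcond.2 (by omega); omega)]
          · simp only [loopA, altBody, hrle]
            rw [if_pos (show (s ≠ String.ofList [c]) from hs)]
            by_cases hlen : ((c, (runA c (c :: cs)).1) :: rleB [] ((runA c (c :: cs)).2)).length ≠ ((s, n') :: rest).length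
            · rw [if_pos hlen]
            · rw [if_neg hlen]
              simp only [checkB]
              rw [if_pos (show (s ≠ String.ofList [c]) from hs)]
  termination_by chars => chars.length
  decreasing_by
    rw [runA_cons_eq]
    exact Nat.lt_succ_of_le (runA_len_le c cs)

-- ===== VERDICT (by name: the statement is the Claim_ definition above) =====
theorem stretchy_spec : Claim_equal_stretchy := by
  intro reference word _
  unfold Spec_stretchy stretchy stretchy_alt
  rw [loopA_eq_altBody]
  simp [altBody]
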